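-- pv_equiv track=rewrite | github.com/hclee333/cs611_machine_learning_engineering_project | utils/data_processing_flight_bronze.py | generate_monthly_dates
-- ===== SOURCE A (Python) =====
-- from typing import List, Dict
--
-- def generate_monthly_dates(start_year: int, start_month: int,
--                           end_year: int, end_month: int) -> List[tuple]:
--     """
--     Generate list of (year, month) tuples for date range
--
--     Args:
--         start_year: Starting year
--         start_month: Starting month (1-12)
--         end_year: Ending year
--         end_month: Ending month (1-12)
--
--     Returns:
--         List of (year, month) tuples
--     """
--     dates = []
--     current_year = start_year
--     current_month = start_month
--
--     while (current_year < end_year) or (current_year == end_year and current_month <= end_month):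
--         dates.append((current_year, current_month))
--
--         current_month += 1
--         if current_month > 12:
--             current_month = 1
--             current_year += 1
--
--     return dates
-- ===== SOURCE B (Python) =====
-- def generate_monthly_dates(start_year: int, start_month: int,
--                            end_year: int, end_month: int):
--     if (start_year, start_month) > (end_year, end_month):
--         return []
--     start = start_year * 12 + (start_month - 1)
--     end = end_year * 12 + (end_month - 1)
--     return [(idx // 12, idx % 12 + 1) for idx in range(start, end + 1)]
-- ===== Notes on version B (the rewrite author's own statement) =====
-- stated objective: simpler
-- what changed: Replaces the stateful month/year carry loop with closed-form absolute-month arithmetic: after an empty-range guard, a single range over month indices start_year*12+(start_month-1) .. end_year*12+(end_month-1) mapped through divmod, removing the overflow branch and mutable carry state.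
-- outside the precondition, e.g. on generate_monthly_dates(0, 0, 0, 0): A returns [(0, 0)], B returns [(-1, 12)]
import Mathlib
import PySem

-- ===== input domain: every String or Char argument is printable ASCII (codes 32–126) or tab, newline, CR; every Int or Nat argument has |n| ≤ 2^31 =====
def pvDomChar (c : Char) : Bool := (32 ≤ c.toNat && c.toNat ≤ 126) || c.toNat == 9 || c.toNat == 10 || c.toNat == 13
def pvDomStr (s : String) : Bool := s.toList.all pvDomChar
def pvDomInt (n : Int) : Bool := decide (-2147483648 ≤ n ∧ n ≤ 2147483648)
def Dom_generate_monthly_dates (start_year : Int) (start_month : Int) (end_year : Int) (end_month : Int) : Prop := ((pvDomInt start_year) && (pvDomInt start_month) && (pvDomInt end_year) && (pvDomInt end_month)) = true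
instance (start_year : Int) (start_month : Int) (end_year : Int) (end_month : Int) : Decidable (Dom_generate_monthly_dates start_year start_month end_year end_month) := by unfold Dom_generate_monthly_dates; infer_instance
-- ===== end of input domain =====

-- B replaces A's stateful month/year carry loop by a single range of absolute month
-- indices mapped through divmod (simpler: no overflow branch, no mutable carry state).


-- ===== PORT A =====
-- A's while loop: append (year, month), bump month, carry into the year when month > 12.
def gmLoop (end_year : Int) (end_month : Int) (current_year : Int) (current_month : Int) : List (Int × Int) :=
  if h : current_year < end_year ∨ (current_year = end_year ∧ current_month ≤ end_month) then
    (current_year, current_month) ::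
      (if current_month + 1 > 12 then
        gmLoop end_year end_month (current_year + 1) 1
      else
        gmLoop end_year end_month current_year (current_month + 1))
  else []
termination_by ((end_year + 1 - current_year).toNat, (13 - current_month).toNat)
decreasing_by
  · apply Prod.Lex.left; omega
  · apply Prod.Lex.right' <;> omega

def generate_monthly_dates (start_year : Int) (start_month : Int) (end_year : Int) (end_month : Int) : List (Int × Int) :=
  gmLoop end_year end_month start_year start_month

-- ===== PORT B =====
-- '(start_year, start_month) > (end_year, end_month)' is Python's lexicographic tuple comparison, written out.
def generate_monthly_dates_alt (start_year : Int) (start_month : Int) (end_year : Int) (end_month : Int) : List (Int × Int) :=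
  if end_year < start_year ∨ (end_year = start_year ∧ end_month < start_month) then []
  else
    (PySem.List.pyRange (start_year * 12 + (start_month - 1)) (end_year * 12 + (end_month - 1) + 1) 1).map
      (fun idx => (PySem.Int.floordiv idx 12, PySem.Int.mod idx 12 + 1))

-- ===== PRECONDITION & SPEC =====
-- Pre_ restricts months to the function's documented natural domain (1–12), but keeps
-- every call whose start date is lexicographically after its end date (there both
-- programs return [] whatever the month values are); on the excluded malformed-month
-- calls A's carry loop emits raw out-of-range month tuples such as (2020, 13), an
-- artefact of seeding the carry loop with input outside the documented domain.
def Pre_generate_monthly_dates (start_year : Int) (start_month : Int) (end_year : Int) (end_month : Int) : Prop :=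
  (1 ≤ start_month ∧ start_month ≤ 12 ∧ 1 ≤ end_month ∧ end_month ≤ 12) ∨
    (end_year < start_year ∨ (end_year = start_year ∧ end_month < start_month))
instance (start_year : Int) (start_month : Int) (end_year : Int) (end_month : Int) : Decidable (Pre_generate_monthly_dates start_year start_month end_year end_month) := by unfold Pre_generate_monthly_dates; infer_instance

def pvWitness_generate_monthly_dates : Int × Int × Int × Int := (2022, 11, 2023, 2)

def Spec_generate_monthly_dates (start_year : Int) (start_month : Int) (end_year : Int) (end_month : Int) (out : List (Int × Int)) : Prop := out = generate_monthly_dates_alt start_year start_month end_year end_month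
instance (start_year : Int) (start_month : Int) (end_year : Int) (end_month : Int) (out : List (Int × Int)) : Decidable (Spec_generate_monthly_dates start_year start_month end_year end_month out) := by unfold Spec_generate_monthly_dates; infer_instance

-- ===== CLAIM (what is proved, stated in full; the proofs are below) =====
def Claim_equal_generate_monthly_dates : Prop := ∀ (start_year : Int) (start_month : Int) (end_year : Int) (end_month : Int), Dom_generate_monthly_dates start_year start_month end_year end_month → Pre_generate_monthly_dates start_year start_month end_year end_month → Spec_generate_monthly_dates start_year start_month end_year end_month (generate_monthly_dates start_year start_month end_year end_month)

-- ===== LEMMAS AND PROOFS =====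

theorem gmLoop_eq (ey em : Int) (hem1 : 1 ≤ em) (hem2 : em ≤ 12) (y m : Int) (hm1 : 1 ≤ m) (hm2 : m ≤ 12) :
    gmLoop ey em y m =
      (PySem.List.pyRange (y * 12 + (m - 1)) (ey * 12 + (em - 1) + 1) 1).map
        (fun idx => (PySem.Int.floordiv idx 12, PySem.Int.mod idx 12 + 1)) := by
  refine gmLoop.induct ey em
    (fun y m => 1 ≤ m → m ≤ 12 →
      gmLoop ey em y m =
        (PySem.List.pyRange (y * 12 + (m - 1)) (ey * 12 + (em - 1) + 1) 1).map
          (fun idx => (PySem.Int.floordiv idx 12, PySem.Int.mod idx 12 + 1)))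
    ?_ ?_ y m hm1 hm2
  · intro y m h ih1 ih2 hm1 hm2
    have hlt : y * 12 + (m - 1) < ey * 12 + (em - 1) + 1 := by
      rcases h with h | ⟨h, h'⟩ <;> nlinarith
    have hfd : PySem.Int.floordiv (y * 12 + (m - 1)) 12 = y := by
      rw [PySem.Int.floordiv_eq_iff_of_pos (by norm_num)]; omega
    have hmd : PySem.Int.mod (y * 12 + (m - 1)) 12 = m - 1 := by
      have hid := PySem.Int.floordiv_mul_add_mod (y * 12 + (m - 1)) 12
      rw [hfd] at hid; omega
    rw [gmLoop, dif_pos h, PySem.List.pyRange_one_cons hlt, List.map_cons, hfd, hmd]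
    by_cases hc : m + 1 > 12
    · have hm12 : m = 12 := by omega
      have hnext : (y + 1) * 12 + (1 - 1 : Int) = y * 12 + (m - 1) + 1 := by omega
      rw [if_pos hc, ih1 (by omega) (by omega), hnext]
      simp [hm12]
    · have hnext : y * 12 + (m + 1 - 1 : Int) = y * 12 + (m - 1) + 1 := by omega
      rw [if_neg hc, ih2 hc (by omega) (by omega), hnext]
      simp
  · intro y m h hm1 hm2
    have hge : ey * 12 + (em - 1) + 1 ≤ y * 12 + (m - 1) := by
      push Not at h
      rcases lt_or_ge ey y with hy | hy
      · nlinarith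
      · have hye : y = ey := le_antisymm hy (by omega)
        have := h.2 hye
        omega
    rw [gmLoop, dif_neg h, PySem.List.pyRange_one_eq_nil hge, List.map_nil]

-- ===== VERDICT (by name: the statement is the Claim_ definition above) =====
theorem generate_monthly_dates_spec : Claim_equal_generate_monthly_dates := by
  intro sy sm ey em _ hpre
  unfold Spec_generate_monthly_dates generate_monthly_dates generate_monthly_dates_alt
  by_cases hg : ey < sy ∨ (ey = sy ∧ em < sm)
  · rw [if_pos hg, gmLoop, dif_neg (by omega)]
  · rcases hpre with ⟨h1, h2, h3, h4⟩ | h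
    · rw [if_neg hg]
      exact gmLoop_eq ey em h3 h4 sy sm h1 h2
    · exact absurd h hg
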